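-- pv_equiv track=rewrite | github.com/mdinesh9/vehicle_detector | dataset/scripts/2_clean_names.py | destination_foldername
-- ===== SOURCE A (Python) =====
-- def destination_foldername(folder):
--     if "car" in folder:
--         return "car"
--     elif "bus" in folder:
--         return "bus"
--     elif "van" in folder:
--         return "van"
--     elif "suv" in folder:
--         return "suv"
--     elif "motorbike" in folder:
--         return "motorbike"
--     elif "ambulance" in folder:
--         return "ambulance"
--     elif any([name in folder for name in ["fire truck", "fire_truck", "truck","fire"]]):
--         return "truck"
--     elif any([name in folder for name in ["police", "police car", "police_car"]]):
--         return "police_car"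
--     elif "moped" in folder:
--         return "moped"
--     elif "minivan" in folder:
--         return "minivan"
-- ===== SOURCE B (Python) =====
-- # Priority-table approach: collect ALL matching patterns, then pick the
-- # highest-priority (minimum) one, instead of A's ordered early-exit cascade.
-- PATTERNS = {
--     "car": (0, "car"),
--     "bus": (1, "bus"),
--     "van": (2, "van"),
--     "suv": (3, "suv"),
--     "motorbike": (4, "motorbike"),
--     "ambulance": (5, "ambulance"),
--     "fire truck": (6, "truck"),
--     "fire_truck": (6, "truck"),
--     "truck": (6, "truck"),
--     "fire": (6, "truck"),
--     "police": (7, "police_car"),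
--     "police car": (7, "police_car"),
--     "police_car": (7, "police_car"),
--     "moped": (8, "moped"),
--     "minivan": (9, "minivan"),
-- }
--
-- def destination_foldername(folder):
--     hits = [pl for pat, pl in PATTERNS.items() if pat in folder]
--     return min(hits)[1] if hits else None
-- ===== Notes on version B (the rewrite author's own statement) =====
-- stated objective: alternative
-- what changed: Instead of A's ordered elif cascade with early exit, B tests every pattern against the folder, collects all matches as (priority,label) pairs from one table, and returns the label of the minimum-priority match.
import Mathlib
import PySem

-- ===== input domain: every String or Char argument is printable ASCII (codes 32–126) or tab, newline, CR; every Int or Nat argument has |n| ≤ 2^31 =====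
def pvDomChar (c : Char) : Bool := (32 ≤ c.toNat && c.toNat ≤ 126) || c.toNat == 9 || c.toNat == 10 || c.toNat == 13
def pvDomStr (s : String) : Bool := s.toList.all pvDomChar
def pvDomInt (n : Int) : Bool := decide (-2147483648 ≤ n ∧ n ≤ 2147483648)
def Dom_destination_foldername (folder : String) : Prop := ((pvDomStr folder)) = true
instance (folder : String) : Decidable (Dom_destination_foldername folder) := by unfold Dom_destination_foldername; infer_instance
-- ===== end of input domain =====

-- B collects all matching patterns from a priority table and returns the min-priority label, instead of A's early-exit elif cascade (alternative; same cost).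


-- ===== PORT A =====
def destination_foldername (folder : String) : Option String :=
  if PySem.Str.isIn "car" folder then some "car"
  else if PySem.Str.isIn "bus" folder then some "bus"
  else if PySem.Str.isIn "van" folder then some "van"
  else if PySem.Str.isIn "suv" folder then some "suv"
  else if PySem.Str.isIn "motorbike" folder then some "motorbike"
  else if PySem.Str.isIn "ambulance" folder then some "ambulance"
  else if (["fire truck", "fire_truck", "truck", "fire"].map (fun name => PySem.Str.isIn name folder)).any id then some "truck"
  else if (["police", "police car", "police_car"].map (fun name => PySem.Str.isIn name folder)).any id then some "police_car"
  else if PySem.Str.isIn "moped" folder then some "moped"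
  else if PySem.Str.isIn "minivan" folder then some "minivan"
  else none

-- ===== PORT B =====
-- pattern -> (priority, label), insertion order of Source B's dict
def pvPatterns : List (String × Int × String) :=
  [ ("car", (0, "car")), ("bus", (1, "bus")), ("van", (2, "van")), ("suv", (3, "suv")),
    ("motorbike", (4, "motorbike")), ("ambulance", (5, "ambulance")),
    ("fire truck", (6, "truck")), ("fire_truck", (6, "truck")), ("truck", (6, "truck")), ("fire", (6, "truck")),
    ("police", (7, "police_car")), ("police car", (7, "police_car")), ("police_car", (7, "police_car")),
    ("moped", (8, "moped")), ("minivan", (9, "minivan")) ]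

-- Python's min over a nonempty list of tuples: keep the current element unless the next is strictly smaller (lexicographic)
def pvMinPair : (Int × String) → List (Int × String) → (Int × String)
  | cur, [] => cur
  | cur, x :: xs => pvMinPair (if x.1 < cur.1 ∨ (x.1 = cur.1 ∧ x.2 < cur.2) then x else cur) xs

def destination_foldername_alt (folder : String) : Option String :=
  match (pvPatterns.filter (fun p => PySem.Str.isIn p.1 folder)).map (·.2) with
  | [] => none
  | h :: t => some (pvMinPair h t).2

-- ===== PRECONDITION & SPEC =====
def Spec_destination_foldername (folder : String) (out : Option String) : Prop := out = destination_foldername_alt folder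
instance (folder : String) (out : Option String) : Decidable (Spec_destination_foldername folder out) := by unfold Spec_destination_foldername; infer_instance

-- ===== CLAIM (what is proved, stated in full; the proofs are below) =====
def Claim_equal_destination_foldername : Prop := ∀ (folder : String), Dom_destination_foldername folder → Spec_destination_foldername folder (destination_foldername folder)

-- ===== LEMMAS AND PROOFS =====

-- Python's min of a nonempty tuple list returns its first element when no later element is strictly smaller.
theorem pvMinPair_eq_self (cur : Int × String) (xs : List (Int × String))
    (h : ∀ x ∈ xs, ¬(x.1 < cur.1 ∨ (x.1 = cur.1 ∧ x.2 < cur.2))) : pvMinPair cur xs = cur := by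
  induction xs with
  | nil => rfl
  | cons x xs ih =>
    rw [pvMinPair, if_neg (h x (by simp))]
    exact ih (fun y hy => h y (by simp [hy]))

theorem pv_find?_eq_head?_filter {α : Type} (p : α → Bool) (l : List α) :
    l.find? p = (l.filter p).head? := by
  induction l with
  | nil => rfl
  | cons a l ih =>
    cases h : p a
    · rw [List.find?_cons_of_neg (by simp [h]), List.filter_cons_of_neg (by simp [h]), ih]
    · rw [List.find?_cons_of_pos h, List.filter_cons_of_pos h, List.head?_cons]

-- priorities are nondecreasing along the table, and equal priorities carry equal labels
theorem pvPatterns_sorted :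
    pvPatterns.Pairwise (fun a b => a.2.1 < b.2.1 ∨ (a.2.1 = b.2.1 ∧ a.2.2 = b.2.2)) := by
  decide

-- B (filter all matches, take the min) returns the first matching rule's label
theorem alt_eq_find? (folder : String) :
    destination_foldername_alt folder
      = (pvPatterns.find? (fun p => PySem.Str.isIn p.1 folder)).map (fun p => p.2.2) := by
  unfold destination_foldername_alt
  rw [pv_find?_eq_head?_filter]
  have hp := pvPatterns_sorted.filter (fun p => PySem.Str.isIn p.1 folder)
  cases h : pvPatterns.filter (fun p => PySem.Str.isIn p.1 folder) with
  | nil => simp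
  | cons a t =>
    rw [h] at hp
    have hmin : ∀ x ∈ t.map (fun p => p.2), ¬(x.1 < a.2.1 ∨ (x.1 = a.2.1 ∧ x.2 < a.2.2)) := by
      intro x hx
      simp only [List.mem_map] at hx
      obtain ⟨b, hb, rfl⟩ := hx
      have hr := (List.pairwise_cons.mp hp).1 b hb
      rcases hr with hlt | ⟨he, hl⟩
      · rintro (hc | ⟨hc, -⟩) <;> omega
      · rintro (hc | ⟨-, hc⟩)
        · omega
        · rw [hl] at hc; exact lt_irrefl _ hc
    simp only [List.map, List.head?, pvMinPair_eq_self a.2 (t.map (fun p => p.2)) hmin,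
      Option.map]

-- ===== VERDICT (by name: the statement is the Claim_ definition above) =====
theorem destination_foldername_spec : Claim_equal_destination_foldername := by
  intro folder _
  unfold Spec_destination_foldername
  rw [alt_eq_find?]
  unfold destination_foldername pvPatterns
  cases h1 : PySem.Str.isIn "car" folder
  case true => simp_all [List.find?]
  cases h2 : PySem.Str.isIn "bus" folder
  case true => simp_all [List.find?]
  cases h3 : PySem.Str.isIn "van" folder
  case true => simp_all [List.find?]
  cases h4 : PySem.Str.isIn "suv" folder
  case true => simp_all [List.find?]
  cases h5 : PySem.Str.isIn "motorbike" folder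
  case true => simp_all [List.find?]
  cases h6 : PySem.Str.isIn "ambulance" folder
  case true => simp_all [List.find?]
  cases h7 : PySem.Str.isIn "fire truck" folder
  case true => simp_all [List.find?]
  cases h8 : PySem.Str.isIn "fire_truck" folder
  case true => simp_all [List.find?]
  cases h9 : PySem.Str.isIn "truck" folder
  case true => simp_all [List.find?]
  cases h10 : PySem.Str.isIn "fire" folder
  case true => simp_all [List.find?]
  cases h11 : PySem.Str.isIn "police" folder
  case true => simp_all [List.find?]
  cases h12 : PySem.Str.isIn "police car" folder
  case true => simp_all [List.find?]
  cases h13 : PySem.Str.isIn "police_car" folder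
  case true => simp_all [List.find?]
  cases h14 : PySem.Str.isIn "moped" folder
  case true => simp_all [List.find?]
  cases h15 : PySem.Str.isIn "minivan" folder
  case true => simp_all [List.find?]
  simp_all [List.find?]
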